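-- pv_equiv track=rewrite | github.com/Biomedical-Imaging-Group/psf_generator | src/utils/handling_zernike.py | index_to_nl
-- ===== SOURCE A (Python) =====
-- from typing import List, Tuple
--
-- def index_to_nl(index: int) -> Tuple[int, int]:
--     """
--     Find the [n, l]-pair given OSA index l for Zernike polynomials.
--     The OSA index 'j' is defined as
--     $j = (n(n + 2) + l) / 2$.
--
--     Parameters:
--     ----------
--     index: int
--         OSA index j
--
--     Returns
--     -------
--     [n, - n + 2 * l]: [int, int]
--         Corresponding [n, l]-pair
--     """
--     n = 0
--     while True:
--         for l in range(n + 1):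
--             if n * (n + 1) / 2 + l == index:
--                 return n, - n + 2 * l
--             elif n * (n + 1) / 2 + l > index:
--                 raise ValueError('Index out of bounds.')
--         n += 1
-- ===== SOURCE B (Python) =====
-- def index_to_nl(index: int):
--     """Binary search for the largest n with n*(n+1)//2 <= index, instead of
--     scanning every (n, l) pair linearly."""
--     lo, hi = 0, index  # invariant: T(lo) <= index < T(hi + 1)
--     while lo < hi:
--         mid = (lo + hi + 1) // 2
--         if mid * (mid + 1) // 2 <= index:
--             lo = mid
--         else:
--             hi = mid - 1
--     l = index - lo * (lo + 1) // 2
--     return lo, -lo + 2 * l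
-- ===== Notes on version B (the rewrite author's own statement) =====
-- stated objective: faster
-- what changed: Replaces A's linear scan over every (n,l) pair with a binary search for the largest n with n*(n+1)/2 <= index.
import Mathlib
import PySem

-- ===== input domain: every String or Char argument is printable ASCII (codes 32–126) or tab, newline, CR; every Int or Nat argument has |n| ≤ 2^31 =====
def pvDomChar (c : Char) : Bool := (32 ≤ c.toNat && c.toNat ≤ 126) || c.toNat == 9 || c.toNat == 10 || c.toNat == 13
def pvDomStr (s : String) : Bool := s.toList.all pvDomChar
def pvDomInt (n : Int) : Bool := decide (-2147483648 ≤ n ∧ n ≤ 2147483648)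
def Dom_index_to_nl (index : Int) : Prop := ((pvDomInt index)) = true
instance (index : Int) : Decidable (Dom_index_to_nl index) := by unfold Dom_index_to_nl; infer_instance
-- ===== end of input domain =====

-- B replaces A's linear scan over every (n, l) pair with a binary search for the largest
-- n with n*(n+1)/2 <= index (asymptotically faster); equivalence is for the return value.

-- ===== PORT A =====
-- Python's 'n * (n + 1) / 2' is float true division; n*(n+1) is always even and within Dom
-- the values fit a double exactly, so integer division (Int./, which floors for the positive
-- divisor 2) is exact here.
-- Inner 'for l in range(n + 1)' loop: some (some v) = return v, some none = raise, none = loop ran out.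
def innerA (index n : Int) : Int → Nat → Option (Option (List Int))
  | _, 0 => none
  | l, fuel + 1 =>
    if n * (n + 1) / 2 + l = index then some (some [n, -n + 2 * l])
    else if n * (n + 1) / 2 + l > index then some none
    else innerA index n (l + 1) fuel

-- Outer 'while True' loop with n increasing; fuel index.toNat + 1 always suffices: the loop
-- ends (returns or raises) no later than n = max index 0, since n ≤ n*(n+1)/2 for 0 ≤ n.
def outerA (index : Int) : Int → Nat → Option (List Int)
  | _, 0 => none
  | n, fuel + 1 =>
    match innerA index n 0 (n + 1).toNat with
    | some r => r
    | none => outerA index (n + 1) fuel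

def index_to_nl (index : Int) : List Int :=
  (outerA index 0 (index.toNat + 1)).getD []

-- ===== PORT B =====
-- binary search: returns the final 'lo'
def loopB (index lo hi : Int) : Int :=
  if _h : lo < hi then
    let mid := PySem.Int.floordiv (lo + hi + 1) 2
    if PySem.Int.floordiv (mid * (mid + 1)) 2 ≤ index then loopB index mid hi
    else loopB index lo (mid - 1)
  else lo
termination_by (hi - lo).toNat
decreasing_by
  · simp only [PySem.Int.floordiv_eq_ediv_of_pos (show (0:Int) < 2 by norm_num)] at *
    omega
  · simp only [PySem.Int.floordiv_eq_ediv_of_pos (show (0:Int) < 2 by norm_num)] at *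
    omega

def index_to_nl_alt (index : Int) : List Int :=
  let lo := loopB index 0 index
  let l := index - PySem.Int.floordiv (lo * (lo + 1)) 2
  [lo, -lo + 2 * l]

-- ===== PRECONDITION & SPEC =====
-- A raises ValueError on every negative index (and returns on every index ≥ 0), so
-- Pre_ is exactly 0 ≤ index.
def Pre_index_to_nl (index : Int) : Prop := 0 ≤ index
instance (index : Int) : Decidable (Pre_index_to_nl index) := by unfold Pre_index_to_nl; infer_instance
def pvWitness_index_to_nl : Int := 7

def Spec_index_to_nl (index : Int) (out : List Int) : Prop := out = index_to_nl_alt index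
instance (index : Int) (out : List Int) : Decidable (Spec_index_to_nl index out) := by unfold Spec_index_to_nl; infer_instance

-- ===== CLAIM (what is proved, stated in full; the proofs are below) =====
def Claim_equal_index_to_nl : Prop := ∀ (index : Int), Dom_index_to_nl index → Pre_index_to_nl index → Spec_index_to_nl index (index_to_nl index)

-- ===== LEMMAS AND PROOFS =====

-- T n = n(n+1)/2, the triangular number, as used by both ports (exact: n(n+1) is even).
def T (n : Int) : Int := n * (n + 1) / 2

theorem two_mul_T (n : Int) : 2 * T n = n * (n + 1) := by
  unfold T
  rw [Int.mul_ediv_cancel' ]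
  exact (Int.even_mul_succ_self n).two_dvd

theorem floordiv_T (n : Int) : PySem.Int.floordiv (n * (n + 1)) 2 = T n := by
  rw [PySem.Int.floordiv_eq_ediv_of_pos (by norm_num)]; rfl

theorem T_mono {a b : Int} (h0 : 0 ≤ a) (h : a ≤ b) : T a ≤ T b := by
  have h2 : 2 * T a ≤ 2 * T b := by rw [two_mul_T, two_mul_T]; nlinarith
  omega

theorem T_unique {a b index : Int} (ha0 : 0 ≤ a) (hb0 : 0 ≤ b)
    (ha : T a ≤ index) (ha' : index < T (a + 1))
    (hb : T b ≤ index) (hb' : index < T (b + 1)) : a = b := by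
  rcases lt_trichotomy a b with h | h | h
  · have := T_mono (by omega) (show a + 1 ≤ b by omega)
    omega
  · exact h
  · have := T_mono (by omega) (show b + 1 ≤ a by omega)
    omega

theorem T_succ (n : Int) : T (n + 1) = T n + (n + 1) := by
  have h1 := two_mul_T n
  have h2 := two_mul_T (n + 1)
  have h3 : (n + 1) * (n + 1 + 1) = n * (n + 1) + 2 * (n + 1) := by ring
  omega

theorem T_ge_self {n : Int} (h : 0 ≤ n) : n ≤ T n := by
  have h1 := two_mul_T n
  have h2 : 0 ≤ n * (n - 1) := by
    rcases eq_or_lt_of_le h with h' | h'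
    · simp [← h']
    · exact mul_nonneg h (by omega)
  have h3 : n * (n + 1) = n * (n - 1) + 2 * n := by ring
  omega

-- the inner loop, fully characterised
theorem innerA_spec (index n : Int) (fuel : Nat) (l : Int) :
    innerA index n l fuel =
      if fuel = 0 then none
      else if index < T n + l then some none
      else if index < T n + l + fuel then some (some [n, -n + 2 * (index - T n)])
      else none := by
  induction fuel generalizing l with
  | zero => simp [innerA]
  | succ fuel ih =>
    show (if n * (n + 1) / 2 + l = index then some (some [n, -n + 2 * l])
      else if n * (n + 1) / 2 + l > index then some none
      else innerA index n (l + 1) fuel) = _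
    have hT : n * (n + 1) / 2 = T n := rfl
    rw [hT]
    by_cases h1 : T n + l = index
    · rw [if_pos (by omega : T n + l = index)]
      have hl : index - T n = l := by omega
      split_ifs
      all_goals first
        | rfl
        | rw [hl]
        | omega
    · rw [if_neg (by omega : ¬ T n + l = index)]
      by_cases h2 : T n + l > index
      · rw [if_pos h2]
        split_ifs
        all_goals first
          | rfl
          | omega
      · rw [if_neg h2, ih]
        split_ifs
        all_goals first
          | rfl
          | omega

-- the outer loop: provided enough fuel and the invariant T n ≤ index, it lands on the
-- unique n with T n ≤ index < T (n+1)
theorem outerA_spec (index : Int) (fuel : Nat) (n : Int) (hn : 0 ≤ n)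
    (hlo : T n ≤ index) (hf : index < n + fuel) :
    ∃ m, outerA index n fuel = some [m, -m + 2 * (index - T m)] ∧
      0 ≤ m ∧ T m ≤ index ∧ index < T (m + 1) := by
  induction fuel generalizing n with
  | zero =>
    exfalso
    have := T_ge_self hn
    simp at hf
    omega
  | succ fuel ih =>
    show ∃ m, (match innerA index n 0 (n + 1).toNat with
      | some r => r
      | none => outerA index (n + 1) fuel) = some [m, -m + 2 * (index - T m)] ∧ _
    rw [innerA_spec]
    have htn : ((n + 1).toNat : Int) = n + 1 := by omega
    by_cases hbig : index < T (n + 1)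
    · refine ⟨n, ?_, hn, hlo, hbig⟩
      have h1 : ¬ (n + 1).toNat = 0 := by omega
      have h2 : ¬ index < T n + 0 := by omega
      have h3 : index < T n + 0 + ((n + 1).toNat : Int) := by
        rw [htn]; have := T_succ n; omega
      simp only [if_neg h1, if_neg h2, if_pos h3]
    · have h1 : ¬ (n + 1).toNat = 0 := by omega
      have h2 : ¬ index < T n + 0 := by omega
      have h3 : ¬ index < T n + 0 + ((n + 1).toNat : Int) := by
        rw [htn]; have := T_succ n; omega
      simp only [if_neg h1, if_neg h2, if_neg h3]
      exact ih (n + 1) (by omega) (by have := T_succ n; omega) (by push_cast at hf ⊢; omega)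

-- B's binary search lands on the same unique n
theorem loopB_spec (index : Int) (k : Nat) : ∀ lo hi : Int, (hi - lo).toNat ≤ k →
    0 ≤ lo → lo ≤ hi → T lo ≤ index → index < T (hi + 1) →
    0 ≤ loopB index lo hi ∧ T (loopB index lo hi) ≤ index ∧
      index < T (loopB index lo hi + 1) := by
  induction k with
  | zero =>
    intro lo hi hk h0 hle hlo hhi
    have hEq : lo = hi := by omega
    rw [loopB, dif_neg (by omega : ¬ lo < hi)]
    exact ⟨h0, hlo, hEq ▸ hhi⟩
  | succ k ih =>
    intro lo hi hk h0 hle hlo hhi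
    by_cases h : lo < hi
    · rw [loopB, dif_pos h]
      simp only [floordiv_T]
      set m := PySem.Int.floordiv (lo + hi + 1) 2 with hm
      have hmideq : m = (lo + hi + 1) / 2 :=
        PySem.Int.floordiv_eq_ediv_of_pos (by norm_num)
      have hmb : lo < m ∧ m ≤ hi := by omega
      split_ifs with hc
    -- recurse on the upper half
      · exact ih m hi (by omega) (by omega) (by omega) hc hhi
      -- recurse on the lower half
      · have hm1 : m - 1 + 1 = m := by omega
        exact ih lo (m - 1) (by omega) h0 (by omega) hlo (by rw [hm1]; omega)
    · rw [loopB, dif_neg h]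
      have hEq : lo = hi := by omega
      exact ⟨h0, hlo, hEq ▸ hhi⟩

theorem T_succ_gt {index : Int} (h : 0 ≤ index) : index < T (index + 1) := by
  have h1 := T_succ index
  have h2 := T_ge_self h
  omega

-- ===== VERDICT (by name: the statement is the Claim_ definition above) =====
theorem index_to_nl_spec : Claim_equal_index_to_nl := by
  intro index _hdom hpre
  have hpre : 0 ≤ index := hpre
  unfold Spec_index_to_nl index_to_nl
  obtain ⟨m, hout, hm0, hm1, hm2⟩ :=
    outerA_spec index (index.toNat + 1) 0 le_rfl (by unfold T; simpa using hpre)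
      (by push_cast; omega)
  obtain ⟨hb0, hb1, hb2⟩ :=
    loopB_spec index index.toNat 0 index (by omega) le_rfl hpre (by unfold T; simpa using hpre) (T_succ_gt hpre)
  have heq : m = loopB index 0 index := T_unique hm0 hb0 hm1 hm2 hb1 hb2
  simp only [index_to_nl_alt, floordiv_T]
  rw [hout, Option.getD_some, heq]
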